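-- pv_equiv track=rewrite | github.com/zeropointnothing/pyBox | tedi.py | lst_ltr_ext
-- ===== SOURCE A (Python) =====
-- PUNCT = ['!','@','#','$','%','^','&','*','(',')','_',
-- '-','=','+','~','{',' ','}','|',':',';',"'",'<',',','>','.','/','?',]
--
-- def characterinsert(string, position, insertion):
--     """
--     Insert a character into a string.
--
--     [TIP: The first character is at the position 0.]
--     """
--     length = len(string)
--     if (position > length or position < 0):
--         return string
--     return string[:position] + insertion + string[position:]
--
-- def lst_ltr_ext(string: str, num: int) -> str:
--     """
--     Extends the last letter in a string to a specified amount.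
--
--     Will seek for the last letter it can find, skipping over symbols.
--     """
--     last = len(string) - 1
--     while True:
--         ## Seek for the last letter in the String.
--         if string[last] in PUNCT:
--             last -= 1
--             continue
--
--         stadd = string[last] * num
--         string = characterinsert(string, last, stadd)
--         return string
-- ===== SOURCE B (Python) =====
-- PUNCT = ['!','@','#','$','%','^','&','*','(',')','_',
-- '-','=','+','~','{',' ','}','|',':',';',"'",'<',',','>','.','/','?',]
--
-- def lst_ltr_ext(string: str, num: int) -> str:
--     special = set(PUNCT)
--     prefix, letter, suffix = "", None, ""
--     for c in string:
--         if c in special: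
--             suffix += c
--         elif letter is None:
--             prefix += suffix
--             letter, suffix = c, ""
--         else:
--             prefix += letter + suffix
--             letter, suffix = c, ""
--     return prefix + letter * num + letter + suffix
-- ===== Notes on version B (the rewrite author's own statement) =====
-- stated objective: alternative
-- what changed: Replaces A's backward index seek plus characterinsert slicing with a single forward pass over the string keeping a (prefix, last-letter, trailing-punct-run) accumulator and assembling the result from that state at the end.
import Mathlib
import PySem

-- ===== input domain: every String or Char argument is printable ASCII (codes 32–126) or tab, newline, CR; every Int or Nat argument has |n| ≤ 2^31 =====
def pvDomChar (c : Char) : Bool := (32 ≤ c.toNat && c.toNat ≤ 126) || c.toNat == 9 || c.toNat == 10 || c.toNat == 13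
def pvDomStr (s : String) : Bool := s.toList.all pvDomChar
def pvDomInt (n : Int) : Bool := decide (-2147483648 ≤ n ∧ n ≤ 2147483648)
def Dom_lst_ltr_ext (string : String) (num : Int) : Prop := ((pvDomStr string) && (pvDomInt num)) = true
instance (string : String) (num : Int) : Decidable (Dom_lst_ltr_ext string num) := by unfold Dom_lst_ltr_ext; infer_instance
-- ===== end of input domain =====

-- B replaces A's backward seek + characterinsert by one forward pass with a
-- (prefix, last letter, trailing punctuation run) accumulator (objective: alternative).

-- ===== PORT A =====
-- module constant PUNCT (shared by both Pythons)
def PUNCT : List Char := ['!','@','#','$','%','^','&','*','(',')','_',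
  '-','=','+','~','{',' ','}','|',':',';','\'','<',',','>','.','/','?']

-- helper characterinsert(string, position, insertion)
def characterinsert (cs : List Char) (position : Int) (insertion : List Char) : List Char :=
  let length : Int := cs.length
  if position > length ∨ position < 0 then cs
  else PySem.List.slice cs none (some position) ++ insertion ++ PySem.List.slice cs (some position) none

-- the 'while True' seek loop: returns the index 'last' at the first non-PUNCT char,
-- none exactly where Python's string[last] raises IndexError (the fuel, 2*len+1 from the
-- start index len-1, only makes the loop total: it is exhausted only past the IndexError point)
def seekLast (fuel : Nat) (cs : List Char) (last : Int) : Option Int :=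
  match fuel with
  | 0 => none
  | fuel + 1 =>
    match PySem.List.pyGet? cs last with
    | none => none
    | some c => if c ∈ PUNCT then seekLast fuel cs (last - 1) else some last

def lst_ltr_ext (string : String) (num : Int) : String :=
  let cs := string.toList
  match seekLast (2 * cs.length + 1) cs ((cs.length : Int) - 1) with
  | none => ""   -- Python raises IndexError here; excluded by Pre_lst_ltr_ext
  | some last =>
    let stadd := PySem.List.pyRepeat [PySem.List.pyGetD cs last ' '] num
    String.ofList (characterinsert cs last stadd)

-- ===== PORT B =====
-- one step of B's forward loop over the accumulator (prefix, letter, suffix)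
def altStep (st : List Char × Option Char × List Char) (c : Char) :
    List Char × Option Char × List Char :=
  if c ∈ PUNCT then (st.1, st.2.1, st.2.2 ++ [c])
  else
    match st.2.1 with
    | none => (st.1 ++ st.2.2, some c, [])
    | some l => (st.1 ++ [l] ++ st.2.2, some c, [])

def lst_ltr_ext_alt (string : String) (num : Int) : String :=
  let st := string.toList.foldl altStep ([], none, [])
  match st.2.1 with
  | none => ""   -- Python's 'None * num' raises TypeError here; excluded by Pre_lst_ltr_ext
  | some letter =>
    String.ofList (st.1 ++ PySem.List.pyRepeat [letter] num ++ [letter] ++ st.2.2)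

-- ===== PRECONDITION & SPEC =====
-- A (and B) raise when every character of the string is in PUNCT (including the empty string)
def Pre_lst_ltr_ext (string : String) (num : Int) : Prop :=
  string.toList.any (fun c => decide (c ∉ PUNCT)) = true
instance (string : String) (num : Int) : Decidable (Pre_lst_ltr_ext string num) := by
  unfold Pre_lst_ltr_ext; infer_instance
def pvWitness_lst_ltr_ext : String × Int := ("hey!!", 3)

def Spec_lst_ltr_ext (string : String) (num : Int) (out : String) : Prop := out = lst_ltr_ext_alt string num
instance (string : String) (num : Int) (out : String) : Decidable (Spec_lst_ltr_ext string num out) := by unfold Spec_lst_ltr_ext; infer_instance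

-- ===== CLAIM (what is proved, stated in full; the proofs are below) =====
def Claim_equal_lst_ltr_ext : Prop := ∀ (string : String) (num : Int), Dom_lst_ltr_ext string num → Pre_lst_ltr_ext string num → Spec_lst_ltr_ext string num (lst_ltr_ext string num)

-- ===== LEMMAS AND PROOFS =====

-- the seek loop, started at the last index of `front ++ c :: rest` where c is the last
-- non-PUNCT char, walks down through the all-PUNCT suffix `rest` and stops at c's index
lemma seekLast_down (front : List Char) (c : Char) (rest : List Char)
    (hc : c ∉ PUNCT) (hp : ∀ x ∈ rest, x ∈ PUNCT) :
    ∀ (fuel : Nat) (i : Int), (front.length : Int) ≤ i →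
      i < (front.length : Int) + rest.length + 1 →
      (i - front.length).toNat < fuel →
      seekLast fuel (front ++ c :: rest) i = some (front.length : Int) := by
  intro fuel
  induction fuel with
  | zero => intro i _ _ h3; omega
  | succ n ih =>
    intro i h1 h2 h3
    rw [seekLast]
    rw [PySem.List.pyGet?_eq_some_getElem _ (by omega)
      (by simp only [List.length_append, List.length_cons]; omega)]
    by_cases hi : i = (front.length : Int)
    · subst hi
      have he : (front ++ c :: rest)[((front.length : Int)).toNat]'(by
          simp only [List.length_append, List.length_cons]; omega) = c := by
        simp
      rw [he]
      split
      · simp_all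
      · next c1 heq =>
        have h' := Option.some.inj heq
        subst h'
        rw [if_neg hc]
    · have hgt : (front.length : Int) < i := by omega
      have hmem : (front ++ c :: rest)[i.toNat]'(by
          simp only [List.length_append, List.length_cons]; omega) ∈ PUNCT := by
        apply hp
        have h4 : front.length < i.toNat := by omega
        rw [List.getElem_append_right (by omega)]
        obtain ⟨k, hk⟩ : ∃ k, i.toNat - front.length = k + 1 :=
          ⟨i.toNat - front.length - 1, by omega⟩
        simp only [hk, List.getElem_cons_succ]
        apply List.getElem_mem
      split
      · simp_all
      · next c1 heq =>
        have h' := Option.some.inj heq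
        subst h'
        rw [if_pos hmem]
        exact ih (i - 1) (by omega) (by omega) (by omega)

-- the flattening of B's accumulator: the characters consumed so far, in order
def flatSt (st : List Char × Option Char × List Char) : List Char :=
  st.1 ++ st.2.1.toList ++ st.2.2

lemma flatSt_altStep (st : List Char × Option Char × List Char) (c : Char) :
    flatSt (altStep st c) = flatSt st ++ [c] := by
  obtain ⟨p, l, s⟩ := st
  unfold altStep flatSt
  by_cases h : c ∈ PUNCT
  · simp [h]
  · cases l <;> simp [h]

-- B's fold preserves the flattening invariant
lemma foldl_flatSt (cs : List Char) :
    ∀ st : List Char × Option Char × List Char,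
      flatSt (cs.foldl altStep st) = flatSt st ++ cs := by
  induction cs with
  | nil => intro st; simp
  | cons c cs ih =>
    intro st
    simp only [List.foldl_cons, ih, flatSt_altStep, List.append_assoc, List.cons_append,
      List.nil_append]

-- folding an all-PUNCT run only extends the suffix
lemma foldl_punct (rest : List Char) (hp : ∀ x ∈ rest, x ∈ PUNCT) :
    ∀ (p : List Char) (l : Char) (s : List Char),
      rest.foldl altStep (p, some l, s) = (p, some l, s ++ rest) := by
  induction rest with
  | nil => intro p l s; simp
  | cons c cs ih =>
    intro p l s
    have hc : c ∈ PUNCT := hp c (by simp)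
    simp only [List.foldl_cons, altStep, if_pos hc]
    rw [ih (fun x hx => hp x (by simp [hx])) p l (s ++ [c])]
    simp

-- ===== VERDICT (by name: the statement is the Claim_ definition above) =====
theorem lst_ltr_ext_spec : Claim_equal_lst_ltr_ext := by
  intro string num _ hpre
  unfold Spec_lst_ltr_ext
  obtain ⟨x, hx, hxp'⟩ := List.any_eq_true.mp hpre
  have hxp : x ∉ PUNCT := of_decide_eq_true hxp'
  cases hd : string.toList.reverse.dropWhile (fun ch => decide (ch ∈ PUNCT)) with
  | nil =>
    exact absurd (of_decide_eq_true
      (List.dropWhile_eq_nil_iff.mp hd x (List.mem_reverse.mpr hx))) hxp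
  | cons a l =>
    have ha : a ∉ PUNCT := by
      have hne : string.toList.reverse.dropWhile (fun ch => decide (ch ∈ PUNCT)) ≠ [] := by
        rw [hd]; simp
      have h := List.head_dropWhile_not (fun ch => decide (ch ∈ PUNCT)) hne
      simp only [hd, List.head_cons, decide_eq_false_iff_not] at h
      exact h
    have htail : ∀ y ∈ (string.toList.reverse.takeWhile (fun ch => decide (ch ∈ PUNCT))).reverse,
        y ∈ PUNCT := by
      intro y hy
      exact of_decide_eq_true (List.mem_takeWhile_imp
        (p := fun ch => decide (ch ∈ PUNCT)) (List.mem_reverse.mp hy))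
    set tl := (string.toList.reverse.takeWhile (fun ch => decide (ch ∈ PUNCT))).reverse with htl
    have hrev : string.toList.reverse
        = string.toList.reverse.takeWhile (fun ch => decide (ch ∈ PUNCT)) ++ (a :: l) := by
      conv_lhs => rw [← List.takeWhile_append_dropWhile
        (p := fun ch => decide (ch ∈ PUNCT)) (l := string.toList.reverse), hd]
    have hsplit : string.toList = l.reverse ++ a :: tl := by
      have := congrArg List.reverse hrev
      simpa [List.reverse_append] using this
    have hlen : string.toList.length = l.reverse.length + tl.length + 1 := by
      simp only [hsplit, List.length_append, List.length_cons, List.length_reverse]; omega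
    -- A's side: the seek loop stops at index l.reverse.length
    have hseek : seekLast (2 * string.toList.length + 1) string.toList
        ((string.toList.length : Int) - 1) = some (l.reverse.length : Int) := by
      rw [hlen, hsplit]
      exact seekLast_down l.reverse a tl ha htail _ _
        (by simp only [List.length_reverse]; push_cast; omega)
        (by simp only [List.length_reverse]; push_cast; omega)
        (by simp only [List.length_reverse]; push_cast; omega)
    -- B's side: the forward fold ends in state (l.reverse, some a, tl)
    have hfold : string.toList.foldl altStep ([], none, []) = (l.reverse, some a, tl) := by
      rw [hsplit, List.foldl_append, List.foldl_cons]
      have hstep : altStep (l.reverse.foldl altStep ([], none, [])) a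
          = (flatSt (l.reverse.foldl altStep ([], none, [])), some a, []) := by
        obtain ⟨p, lo, s⟩ := l.reverse.foldl altStep ([], none, [])
        unfold altStep flatSt
        cases lo <;> simp [ha]
      rw [hstep, foldl_flatSt]
      have : flatSt (([], none, []) : List Char × Option Char × List Char) = [] := by
        simp [flatSt]
      rw [this, List.nil_append, foldl_punct tl htail]
      simp
    simp only [lst_ltr_ext, lst_ltr_ext_alt, hseek, hfold]
    have hget : PySem.List.pyGetD string.toList ((l.reverse.length : Int)) ' ' = a := by
      rw [PySem.List.pyGetD_natCast, hsplit]
      simp [List.getD_eq_getElem?_getD]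
    rw [hget]
    rw [characterinsert]
    rw [if_neg (by simp only [hlen]; push_cast; omega)]
    rw [PySem.List.slice_to_natCast, PySem.List.slice_from_natCast]
    conv_lhs => rw [hsplit, List.take_left, List.drop_left]
    simp
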